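-- pv_equiv track=rewrite | github.com/Faridelnik/Pi3Diamond | measurements/Rabi_blockpraktikum.py | find_laser_pulses
-- ===== SOURCE A (Python) =====
-- def find_laser_pulses(sequence):
--     n = 0
--     prev = []
--     for channels, t in sequence:
--         if 'trigger' in channels and not 'trigger' in prev:
--             n += 1
--         prev = channels
--     return n
-- ===== SOURCE B (Python) =====
-- def find_laser_pulses(sequence):
--     bits = ''.join('1' if 'trigger' in channels else '0' for channels, t in sequence)
--     return ('0' + bits).count('01')
-- ===== Notes on version B (the rewrite author's own statement) =====
-- stated objective: alternative
-- what changed: Replaces the stateful scan carrying prev with a string encoding: each element becomes bit '1'/'0' for trigger presence, and the answer is the count of the substring '01' in the '0'-prefixed bit string.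
import Mathlib
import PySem

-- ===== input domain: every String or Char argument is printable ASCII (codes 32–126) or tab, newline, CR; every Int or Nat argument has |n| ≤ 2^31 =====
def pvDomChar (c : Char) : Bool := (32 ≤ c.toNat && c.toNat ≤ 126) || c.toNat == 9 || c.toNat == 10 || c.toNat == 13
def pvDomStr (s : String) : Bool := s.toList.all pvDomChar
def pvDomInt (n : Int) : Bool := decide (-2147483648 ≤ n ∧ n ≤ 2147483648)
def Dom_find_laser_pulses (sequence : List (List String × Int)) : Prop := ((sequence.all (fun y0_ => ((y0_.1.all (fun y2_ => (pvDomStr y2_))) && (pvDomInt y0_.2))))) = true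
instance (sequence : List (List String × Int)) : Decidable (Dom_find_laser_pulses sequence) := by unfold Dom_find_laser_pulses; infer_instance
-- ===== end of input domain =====

-- B replaces A's stateful scan carrying prev by a string encoding: one bit per element ('1' iff 'trigger' present) and a substring count of '01' in the '0'-prefixed bit string; same cost, different algorithm.

-- ===== PORT A =====
def find_laser_pulses (sequence : List (List String × Int)) : Int :=
  (sequence.foldl
    (fun (st : Int × List String) ct =>
      (if ct.1.contains "trigger" && !(st.2.contains "trigger") then st.1 + 1 else st.1, ct.1))
    (0, [])).1

-- ===== PORT B =====
-- ''.join of one-character strings is exactly this List Char; '0' + bits is List.cons;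
-- str.count s sub = PySem.Chars.count s.toList sub.toList (definition of PySem.Str.count), exact here.
def find_laser_pulses_alt (sequence : List (List String × Int)) : Int :=
  let bits : List Char := sequence.map (fun ct => if ct.1.contains "trigger" then '1' else '0')
  Int.ofNat (PySem.Chars.count ('0' :: bits) ['0', '1'])

-- ===== PRECONDITION & SPEC =====
def Spec_find_laser_pulses (sequence : List (List String × Int)) (out : Int) : Prop := out = find_laser_pulses_alt sequence
instance (sequence : List (List String × Int)) (out : Int) : Decidable (Spec_find_laser_pulses sequence out) := by unfold Spec_find_laser_pulses; infer_instance

-- ===== CLAIM (what is proved, stated in full; the proofs are below) =====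
def Claim_equal_find_laser_pulses : Prop := ∀ (sequence : List (List String × Int)), Dom_find_laser_pulses sequence → Spec_find_laser_pulses sequence (find_laser_pulses sequence)

-- ===== LEMMAS AND PROOFS =====

-- number of (necessarily non-overlapping) occurrences of "01", consuming both chars on a match
def onecount : List Char → ℕ
  | [] => 0
  | [_] => 0
  | c1 :: c2 :: t => if c1 = '0' ∧ c2 = '1' then 1 + onecount t else onecount (c2 :: t)

-- A's loop body, counted statefully over the flag characters
def stateCount : Char → List Char → Int
  | _, [] => 0
  | p, c :: t => (if p = '0' ∧ c = '1' then 1 else 0) + stateCount c t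

def flagChar (ct : List String × Int) : Char := if ct.1.contains "trigger" then '1' else '0'

theorem go_eq_onecount : ∀ (fuel : ℕ) (l : List Char) (acc : ℕ), l.length ≤ fuel →
    PySem.Chars.count.go ['0', '1'] fuel l acc = acc + onecount l := by
  intro fuel
  induction fuel with
  | zero =>
    intro l acc h
    rw [Nat.le_zero, List.length_eq_zero_iff] at h
    subst h
    simp [PySem.Chars.count.go, onecount]
  | succ f ih =>
    intro l acc h
    match l with
    | [] => simp [PySem.Chars.count.go, onecount]
    | c :: rest =>
      rw [PySem.Chars.count.go]
      by_cases hp : List.isPrefixOf ['0', '1'] (c :: rest) = true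
      · rw [if_pos hp]
        match rest, hp with
        | [], hp => simp [List.isPrefixOf] at hp
        | c2 :: t, hp =>
          simp only [List.isPrefixOf, Bool.and_eq_true, beq_iff_eq] at hp
          obtain ⟨h1, h2, -⟩ := hp
          subst h1; subst h2
          simp only [List.length_cons] at h
          rw [show List.drop (List.length ['0', '1']) ('0' :: '1' :: t) = t from rfl]
          rw [ih t (acc + 1) (by omega)]
          rw [show onecount ('0' :: '1' :: t) = 1 + onecount t from by simp [onecount]]
          omega
      · rw [if_neg hp, ih rest acc (by simpa using Nat.le_of_succ_le_succ h)]
        match rest with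
        | [] => simp [onecount]
        | c2 :: t =>
          have hne : ¬(c = '0' ∧ c2 = '1') := by
            intro ⟨h1, h2⟩; subst h1; subst h2
            simp [List.isPrefixOf] at hp
          simp [onecount, if_neg hne]

theorem onecount_eq_stateCount : ∀ (l : List Char) (p : Char),
    (onecount (p :: l) : Int) = stateCount p l := by
  intro l
  induction l with
  | nil => intro p; simp [onecount, stateCount]
  | cons c t ih =>
    intro p
    by_cases hpc : p = '0' ∧ c = '1'
    · obtain ⟨h1, h2⟩ := hpc; subst h1; subst h2
      have h1t : onecount ('1' :: t) = onecount t := by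
        match t with
        | [] => simp [onecount]
        | x :: s => simp [onecount]
      rw [stateCount, if_pos ⟨rfl, rfl⟩, ← ih '1']
      rw [show onecount ('0' :: '1' :: t) = 1 + onecount ('1' :: t) from by simp [onecount, h1t]]
      push_cast; ring
    · rw [stateCount, if_neg hpc, ← ih c, onecount, if_neg hpc]
      simp

theorem foldA_inv : ∀ (seq : List (List String × Int)) (n : Int) (prev : List String),
    (seq.foldl
      (fun (st : Int × List String) ct =>
        (if ct.1.contains "trigger" && !(st.2.contains "trigger") then st.1 + 1 else st.1, ct.1))
      (n, prev)).1 =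
    n + stateCount (if prev.contains "trigger" then '1' else '0') (seq.map flagChar) := by
  intro seq
  induction seq with
  | nil => intro n prev; simp [stateCount]
  | cons hd tl ih =>
    intro n prev
    simp only [List.foldl, List.map]
    rw [ih]
    by_cases hc : "trigger" ∈ hd.1 <;> by_cases hpv : "trigger" ∈ prev <;>
      · simp [stateCount, flagChar, hc, hpv]
        try ring

-- ===== VERDICT (by name: the statement is the Claim_ definition above) =====
theorem find_laser_pulses_spec : Claim_equal_find_laser_pulses := by
  intro sequence _
  unfold Spec_find_laser_pulses find_laser_pulses find_laser_pulses_alt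
  simp only [show (fun (ct : List String × Int) => if ct.1.contains "trigger" = true then '1' else '0') = flagChar from rfl]
  rw [foldA_inv]
  unfold PySem.Chars.count
  rw [if_neg (by simp), go_eq_onecount _ _ _ (by simp)]
  rw [Nat.zero_add, zero_add]
  exact (onecount_eq_stateCount (List.map flagChar sequence) '0').symm
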